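-- pv_equiv track=rewrite | github.com/IssacWD/CSC1001-Assignment2 | q5.py | statusOfLocker
-- ===== SOURCE A (Python) =====
-- def statusOfLocker(n):
--     count = 0
--     for i in range(1, n+1):
--         if n % i == 0:
--             count += 1
--     if count % 2 == 0:
--         return 'closed'
--     else:
--         return 'open'
-- ===== SOURCE B (Python) =====
-- def statusOfLocker(n):
--     # A locker is open iff n has an odd number of divisors, i.e. iff n is a
--     # positive perfect square; test that with a Newton integer square root.
--     if n <= 0:
--         return 'closed'
--     x = n
--     y = (x + 1) // 2
--     while y < x:
--         x = y
--         y = (x + n // x) // 2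
--     return 'open' if x * x == n else 'closed'
-- ===== Notes on version B (the rewrite author's own statement) =====
-- stated objective: faster
-- what changed: Replaces the O(n) scan counting all divisors by the classical fact that the divisor count is odd exactly for positive perfect squares, tested with a Newton integer square root.
import Mathlib
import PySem

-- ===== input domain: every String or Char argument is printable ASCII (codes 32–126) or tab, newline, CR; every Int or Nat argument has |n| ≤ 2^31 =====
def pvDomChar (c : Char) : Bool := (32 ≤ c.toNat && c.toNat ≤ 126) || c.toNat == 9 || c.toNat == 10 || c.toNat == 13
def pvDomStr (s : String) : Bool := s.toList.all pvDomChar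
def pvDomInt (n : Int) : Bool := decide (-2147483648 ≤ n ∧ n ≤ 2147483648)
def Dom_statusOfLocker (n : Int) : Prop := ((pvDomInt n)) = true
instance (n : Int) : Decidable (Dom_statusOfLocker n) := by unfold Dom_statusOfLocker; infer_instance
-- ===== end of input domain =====

-- B replaces A's O(n) divisor-counting scan by a Newton integer-square-root
-- test ('open' iff n is a positive perfect square).

-- ===== PORT A =====
-- count = 0; for i in range(1, n+1): if n % i == 0: count += 1
def statusOfLocker (n : Int) : String :=
  let count : Int :=
    (PySem.List.pyRange 1 (n + 1) 1).foldl
      (fun count i => if PySem.Int.mod n i = 0 then count + 1 else count) 0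
  if PySem.Int.mod count 2 = 0 then "closed" else "open"

-- ===== PORT B =====
-- the 'while y < x: x = y; y = (x + n // x) // 2' loop of Source B (all values positive)
def altLoop (n x y : Nat) : Nat :=
  if h : y < x then altLoop n y ((y + n / y) / 2) else x
termination_by x
decreasing_by exact h

def statusOfLocker_alt (n : Int) : String :=
  if n ≤ 0 then "closed"
  else
    let m := n.toNat        -- n > 0, so all arithmetic is on positive ints = Nat
    let x := altLoop m m ((m + 1) / 2)
    if x * x = m then "open" else "closed"

-- ===== PRECONDITION & SPEC =====
def Spec_statusOfLocker (n : Int) (out : String) : Prop := out = statusOfLocker_alt n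
instance (n : Int) (out : String) : Decidable (Spec_statusOfLocker n out) := by unfold Spec_statusOfLocker; infer_instance

-- ===== CLAIM (what is proved, stated in full; the proofs are below) =====
def Claim_equal_statusOfLocker : Prop := ∀ (n : Int), Dom_statusOfLocker n → Spec_statusOfLocker n (statusOfLocker n)

-- ===== LEMMAS AND PROOFS =====

-- B's Newton loop is Batteries' `Nat.sqrt.iter` once y has the invariant shape.
theorem altLoop_eq_iter (n : Nat) : ∀ x : Nat, altLoop n x ((x + n / x) / 2) = Nat.sqrt.iter n x := by
  intro x
  induction x using Nat.strong_induction_on with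
  | _ x ih =>
    unfold altLoop Nat.sqrt.iter
    by_cases h : (x + n / x) / 2 < x
    · simp only [dif_pos h]
      exact ih _ h
    · simp only [dif_neg h]

theorem altLoop_bounds (m : Nat) (hm : 0 < m) :
    altLoop m m ((m + 1) / 2) * altLoop m m ((m + 1) / 2) ≤ m ∧
    m < (altLoop m m ((m + 1) / 2) + 1) * (altLoop m m ((m + 1) / 2) + 1) := by
  have hs : (m + m / m) / 2 = (m + 1) / 2 := by rw [Nat.div_self hm]
  have he : altLoop m m ((m + 1) / 2) = Nat.sqrt.iter m m := by
    rw [← hs]; exact altLoop_eq_iter m m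
  rw [he]
  exact ⟨Nat.sqrt.iter_sq_le m m, Nat.sqrt.lt_iter_succ_sq m m (by nlinarith)⟩

theorem altLoop_sq_iff (m : Nat) (hm : 0 < m) :
    (altLoop m m ((m + 1) / 2) * altLoop m m ((m + 1) / 2) = m) ↔ ∃ d : Nat, d * d = m := by
  obtain ⟨h1, h2⟩ := altLoop_bounds m hm
  constructor
  · exact fun h => ⟨_, h⟩
  · rintro ⟨d, rfl⟩
    have : d = altLoop (d * d) (d * d) ((d * d + 1) / 2) := by nlinarith
    rw [← this]

-- counting over `List.range` is a `Finset.range` filter card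
theorem countP_range_eq_card (N : Nat) (p : Nat → Prop) [DecidablePred p] :
    (List.range N).countP (fun k => decide (p k)) = ((Finset.range N).filter p).card := by
  induction N with
  | zero => simp
  | succ N ih =>
    rw [List.range_succ, List.countP_append, Finset.range_add_one, Finset.filter_insert]
    by_cases h : p N
    · rw [if_pos h, Finset.card_insert_of_notMem (by simp)]
      simp [h, ih]
    · rw [if_neg h]
      simp [h, ih]

-- k ↦ k+1 carries the filtered range onto the divisors of m
theorem card_range_filter_divisors (m : Nat) (hm : 0 < m) :
    ((Finset.range m).filter (fun k => (1 + k) ∣ m)).card = m.divisors.card := by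
  apply Finset.card_bij (fun k _ => 1 + k)
  · intro k hk
    simp only [Finset.mem_filter, Finset.mem_range] at hk
    exact Nat.mem_divisors.mpr ⟨hk.2, by omega⟩
  · intro a ha b hb hab; omega
  · intro d hd
    rw [Nat.mem_divisors] at hd
    have h1 : 1 ≤ d := Nat.pos_of_dvd_of_pos hd.1 hm
    have h2 : d ≤ m := Nat.le_of_dvd hm hd.1
    refine ⟨d - 1, ?_, by omega⟩
    simp only [Finset.mem_filter, Finset.mem_range]
    constructor
    · omega
    · have : 1 + (d - 1) = d := by omega
      rw [this]; exact hd.1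

-- the pairing d ↦ m / d: the divisor count of m > 0 is odd iff m is a perfect square
theorem odd_card_divisors_iff (m : Nat) (hm : 0 < m) :
    Odd m.divisors.card ↔ ∃ d : Nat, d * d = m := by
  set s := m.divisors with hsdef
  have hmem : ∀ d, d ∈ s ↔ d ∣ m ∧ m ≠ 0 := fun d => Nat.mem_divisors
  -- the strict halves have equal cardinality
  have hLG : (s.filter (fun d => d * d < m)).card = (s.filter (fun d => m < d * d)).card := by
    apply Finset.card_nbij' (fun d => m / d) (fun d => m / d)
    · intro d hd
      simp only [Finset.coe_filter, Set.mem_setOf_eq, hmem] at hd ⊢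
      obtain ⟨⟨hdvd, _⟩, hlt⟩ := hd
      have hdpos : 0 < d := Nat.pos_of_dvd_of_pos hdvd hm
      have hprod : m / d * d = m := Nat.div_mul_cancel hdvd
      refine ⟨⟨⟨d, by omega⟩, by omega⟩, ?_⟩
      nlinarith [Nat.div_mul_cancel hdvd]
    · intro d hd
      simp only [Finset.coe_filter, Set.mem_setOf_eq, hmem] at hd ⊢
      obtain ⟨⟨hdvd, _⟩, hlt⟩ := hd
      have hdpos : 0 < d := Nat.pos_of_dvd_of_pos hdvd hm
      have hprod : m / d * d = m := Nat.div_mul_cancel hdvd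
      refine ⟨⟨⟨d, by omega⟩, by omega⟩, ?_⟩
      nlinarith
    · intro d hd
      simp only [Finset.coe_filter, Set.mem_setOf_eq, hmem] at hd
      exact Nat.div_div_self hd.1.1 (by omega)
    · intro d hd
      simp only [Finset.coe_filter, Set.mem_setOf_eq, hmem] at hd
      exact Nat.div_div_self hd.1.1 (by omega)
  -- split the whole set
  have hsplit : s.card = (s.filter (fun d => d * d < m)).card
      + ((s.filter (fun d => d * d = m)).card + (s.filter (fun d => m < d * d)).card) := by
    rw [← Finset.card_filter_add_card_filter_not (s := s) (p := fun d => d * d < m)]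
    congr 1
    rw [← Finset.card_filter_add_card_filter_not
        (s := s.filter (fun d => ¬ d * d < m)) (p := fun d => d * d = m)]
    rw [Finset.filter_filter, Finset.filter_filter]
    congr 1
    · congr 1; apply Finset.filter_congr; intro d _; constructor
      · rintro ⟨_, h⟩; exact h
      · intro h; exact ⟨by omega, h⟩
    · congr 1; apply Finset.filter_congr; intro d _; constructor
      · rintro ⟨h1, h2⟩; omega
      · intro h; exact ⟨by omega, by omega⟩
  -- the middle has card 1 exactly on squares
  by_cases h : ∃ d : Nat, d * d = m
  · simp only [h, iff_true]
    obtain ⟨d, hd⟩ := h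
    have hEeq : s.filter (fun e => e * e = m) = {d} := by
      ext e
      simp only [Finset.mem_filter, Finset.mem_singleton, hmem]
      constructor
      · rintro ⟨_, he⟩; exact Nat.mul_self_inj.mp (he.trans hd.symm)
      · intro he; rw [he]
        exact ⟨⟨⟨d, hd.symm⟩, by omega⟩, hd⟩
    rw [hsplit, hEeq, ← hLG, Finset.card_singleton, Nat.odd_iff]; omega
  · simp only [h, iff_false]
    have hEeq : s.filter (fun e => e * e = m) = ∅ := by
      ext e
      simp only [Finset.mem_filter, Finset.notMem_empty, iff_false, not_and]
      exact fun _ he => h ⟨e, he⟩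
    rw [hsplit, hEeq, ← hLG, Finset.card_empty, Nat.odd_iff]; omega

-- A's loop counts the divisors of n among 1..n
theorem countA_eq (m : Nat) (hm : 0 < m) :
    ((PySem.List.pyRange 1 ((m : Int) + 1) 1).foldl
      (fun count i => if PySem.Int.mod (m : Int) i = 0 then count + 1 else count) (0 : Int))
    = (m.divisors.card : Int) := by
  rw [PySem.List.foldl_ite_add_one]
  rw [PySem.List.pyRange_one]
  have hidx : ((m : Int) + 1 - 1).toNat = m := by omega
  rw [hidx, List.countP_map]
  have hcong : ∀ k ∈ List.range m,
      ((fun i => decide (PySem.Int.mod (m : Int) i = 0)) ∘ (fun k : Nat => (1 : Int) + (k : Int))) k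
      = decide ((1 + k) ∣ m) := by
    intro k _
    simp only [Function.comp_apply]
    have hcast : (1 : Int) + (k : Int) = ((1 + k : Nat) : Int) := by push_cast; ring
    rw [hcast, PySem.Int.mod_natCast]
    simp only [decide_eq_decide]
    rw [Int.natCast_eq_zero]
    exact Nat.dvd_iff_mod_eq_zero.symm
  rw [List.countP_congr (fun x hx => by rw [hcong x hx]), countP_range_eq_card, card_range_filter_divisors m hm]
  omega

-- ===== VERDICT (by name: the statement is the Claim_ definition above) =====
theorem statusOfLocker_spec : Claim_equal_statusOfLocker := by
  intro n _
  unfold Spec_statusOfLocker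
  simp only [statusOfLocker, statusOfLocker_alt]
  by_cases hn : n ≤ 0
  · rw [if_pos hn, PySem.List.pyRange_one_eq_nil (by omega)]
    simp only [List.foldl_nil]
    rw [if_pos (by decide : PySem.Int.mod 0 2 = 0)]
  · rw [if_neg hn]
    have hmn : ((n.toNat : Int)) = n := by omega
    have hmpos : 0 < n.toNat := by omega
    rw [← hmn, countA_eq n.toNat hmpos]
    have hiff : (PySem.Int.mod ((n.toNat.divisors.card : Nat) : Int) 2 = 0) ↔ ¬ Odd n.toNat.divisors.card := by
      rw [PySem.Int.mod_eq_emod_of_pos (by norm_num), Nat.odd_iff]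
      omega
    have htonat : ((n.toNat : Int)).toNat = n.toNat := by omega
    rw [htonat]
    by_cases hsq : ∃ d : Nat, d * d = n.toNat
    · rw [if_pos ((altLoop_sq_iff n.toNat hmpos).mpr hsq),
        if_neg (by rw [hiff]; exact fun h => h ((odd_card_divisors_iff n.toNat hmpos).mpr hsq))]
    · rw [if_neg (fun h => hsq ((altLoop_sq_iff n.toNat hmpos).mp h)),
        if_pos (hiff.mpr (fun h => hsq ((odd_card_divisors_iff n.toNat hmpos).mp h)))]
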